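-- pv_equiv track=rewrite | github.com/Kimjongang/ff14-bot-pricecheack | main.py | format_all_worlds
-- ===== SOURCE A (Python) =====
-- def format_all_worlds(world_data):
--     lines = []
--     all_has_hq = False
--
--     for world_name, data in world_data:
--         listings = data.get("listings", [])
--
--         lines.append(f"【{world_name}】")
--
--         if not listings:
--             lines.append("  沒有掛單資料")
--             lines.append("")
--             continue
--
--         for i, x in enumerate(listings[:5], 1):
--             price = f"{x.get('pricePerUnit', 0):,}"
--             qty = x.get("quantity", 0)
--             is_hq = x.get("hq", False)
--
--             if is_hq:
--                 all_has_hq = True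
--
--             hq_tag = "HQ " if is_hq else ""
--             lines.append(f"  {i}. {hq_tag}{price} ({qty}個)")
--
--         lines.append("")
--
--     if not all_has_hq:
--         lines.insert(0, "")
--         lines.insert(0, "（以下皆無HQ商品）")
--
--     return lines
-- ===== SOURCE B (Python) =====
-- def format_all_worlds(world_data):
--     def top5(data):
--         return data.get("listings", [])[:5]
--
--     def fmt_line(i, x):
--         hq_tag = "HQ " if x.get("hq", False) else ""
--         return f"  {i}. {hq_tag}{x.get('pricePerUnit', 0):,} ({x.get('quantity', 0)}個)"
--
--     def block(world_name, data):
--         listings = top5(data)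
--         if not listings:
--             return [f"【{world_name}】", "  沒有掛單資料", ""]
--         return [f"【{world_name}】"] + [fmt_line(i, x) for i, x in enumerate(listings, 1)] + [""]
--
--     all_has_hq = any(x.get("hq", False) for _, data in world_data for x in top5(data))
--     header = [] if all_has_hq else ["（以下皆無HQ商品）", ""]
--     return header + [line for w, d in world_data for line in block(w, d)]
-- ===== Notes on version B (the rewrite author's own statement) =====
-- stated objective: alternative
-- what changed: Replaces A's single stateful pass (accumulating an all_has_hq flag while appending lines, then insert(0) twice) with a two-pass determine-then-construct shape: a prepass computes all_has_hq with any() over the flattened first-5 listings, and the output is header + concatenation of independently built per-world blocks.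
import Mathlib
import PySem

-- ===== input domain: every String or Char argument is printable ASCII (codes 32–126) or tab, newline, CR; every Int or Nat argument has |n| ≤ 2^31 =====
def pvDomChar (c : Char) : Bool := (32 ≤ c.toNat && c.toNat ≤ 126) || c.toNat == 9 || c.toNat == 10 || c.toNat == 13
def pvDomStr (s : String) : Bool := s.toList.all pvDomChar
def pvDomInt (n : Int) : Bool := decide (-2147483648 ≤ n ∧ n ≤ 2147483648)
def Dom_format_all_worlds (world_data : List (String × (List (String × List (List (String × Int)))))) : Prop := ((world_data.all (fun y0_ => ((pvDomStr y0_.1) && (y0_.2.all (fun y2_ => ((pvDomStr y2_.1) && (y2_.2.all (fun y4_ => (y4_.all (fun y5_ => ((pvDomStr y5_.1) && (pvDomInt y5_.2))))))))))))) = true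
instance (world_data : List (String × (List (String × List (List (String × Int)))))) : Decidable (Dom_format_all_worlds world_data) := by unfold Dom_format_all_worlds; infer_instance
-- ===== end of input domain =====

-- B restructures A's single stateful pass into prepass (all_has_hq via any) + header ++ per-world blocks; same output, 'alternative' objective.

-- shared low-level helpers (both Pythons use the identical dict-get and f-string expressions)
-- dict.get(k, dflt) on an association list: first match (the dict type convention)
def pvGetD {ν : Type} (d : List (String × ν)) (k : String) (dflt : ν) : ν :=
  match d.find? (fun p => p.1 == k) with
  | some p => p.2
  | none => dflt

-- truthiness of x.get("hq", False) where present values are ints: nonzero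
def pvHq (x : List (String × Int)) : Bool :=
  match (x.find? (fun p => p.1 == "hq")) with
  | some p => p.2 != 0
  | none => false

-- f"{n:,}" grouping: threes from the least-significant digit (input reversed digits)
def pvCommaRev : List Char → List Char
  | a :: b :: c :: d :: rest => a :: b :: c :: ',' :: pvCommaRev (d :: rest)
  | l => l
termination_by l => l.length

-- f"{n:,}" for an int: exact on integers (sign then grouped digits)
def pvCommaFmt (n : Int) : String :=
  match (PySem.Int.toStr n).toList with
  | '-' :: ds => String.ofList ('-' :: (pvCommaRev ds.reverse).reverse)
  | ds => String.ofList ((pvCommaRev ds.reverse).reverse)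

-- f"  {i}. {hq_tag}{price} ({qty}個)" — the listing line both Pythons build
def pvLine (i : Nat) (x : List (String × Int)) : String :=
  let price := pvCommaFmt (pvGetD x "pricePerUnit" 0)
  let qty := pvGetD x "quantity" 0
  let hq_tag := if pvHq x then "HQ " else ""
  "  " ++ PySem.Int.toStr (Int.ofNat i) ++ ". " ++ hq_tag ++ price ++ " (" ++ PySem.Int.toStr qty ++ "個)"

-- ===== PORT A =====
-- the inner 'for i, x in enumerate(listings[:5], 1)' loop, carrying (lines, all_has_hq)
def fawInnerA (st : List String × Bool) (i : Nat) (xs : List (List (String × Int))) : List String × Bool :=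
  match xs with
  | [] => st
  | x :: rest => fawInnerA (st.1 ++ [pvLine i x], st.2 || pvHq x) (i + 1) rest

-- the outer 'for world_name, data in world_data' loop
def fawOuterA (st : List String × Bool) (ws : List (String × (List (String × List (List (String × Int)))))) : List String × Bool :=
  match ws with
  | [] => st
  | (w, data) :: rest =>
    let listings := pvGetD data "listings" []
    let lines := st.1 ++ ["【" ++ w ++ "】"]
    if listings = [] then
      fawOuterA (lines ++ ["  沒有掛單資料", ""], st.2) rest
    else
      -- listings[:5] is List.take 5 (nonnegative slice)
      let st' := fawInnerA (lines, st.2) 1 (listings.take 5)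
      fawOuterA (st'.1 ++ [""], st'.2) rest

def format_all_worlds (world_data : List (String × (List (String × List (List (String × Int)))))) : List String :=
  let st := fawOuterA ([], false) world_data
  if st.2 then st.1 else "（以下皆無HQ商品）" :: "" :: st.1    -- the two insert(0, …)

-- ===== PORT B =====
-- block(world_name, data): the three fixed lines, or header line :: formatted first-5 ++ [""]
def fawBlock (w : String) (data : List (String × List (List (String × Int)))) : List String :=
  let listings := (pvGetD data "listings" []).take 5
  if listings = [] then
    ["【" ++ w ++ "】", "  沒有掛單資料", ""]
  else
    ["【" ++ w ++ "】"] ++ (listings.zipIdx 1).map (fun p => pvLine p.2 p.1) ++ [""]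

def format_all_worlds_alt (world_data : List (String × (List (String × List (List (String × Int)))))) : List String :=
  let all_has_hq := world_data.any (fun p => ((pvGetD p.2 "listings" []).take 5).any pvHq)
  let header := if all_has_hq then [] else ["（以下皆無HQ商品）", ""]
  header ++ world_data.flatMap (fun p => fawBlock p.1 p.2)

-- ===== PRECONDITION & SPEC =====
def Spec_format_all_worlds (world_data : List (String × (List (String × List (List (String × Int)))))) (out : List String) : Prop := out = format_all_worlds_alt world_data
instance (world_data : List (String × (List (String × List (List (String × Int)))))) (out : List String) : Decidable (Spec_format_all_worlds world_data out) := by unfold Spec_format_all_worlds; infer_instance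

-- ===== CLAIM (what is proved, stated in full; the proofs are below) =====
def Claim_equal_format_all_worlds : Prop := ∀ (world_data : List (String × (List (String × List (List (String × Int)))))), Dom_format_all_worlds world_data → Spec_format_all_worlds world_data (format_all_worlds world_data)

-- ===== LEMMAS AND PROOFS =====

theorem fawInnerA_eq (xs : List (List (String × Int))) (st : List String × Bool) (i : Nat) :
    fawInnerA st i xs = (st.1 ++ (xs.zipIdx i).map (fun p => pvLine p.2 p.1), st.2 || xs.any pvHq) := by
  induction xs generalizing st i with
  | nil => simp [fawInnerA]
  | cons x rest ih =>
    simp only [fawInnerA, ih, List.zipIdx_cons, List.map_cons, List.any_cons]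
    simp [Bool.or_assoc]

theorem fawOuterA_eq (ws : List (String × (List (String × List (List (String × Int)))))) (st : List String × Bool) :
    fawOuterA st ws = (st.1 ++ ws.flatMap (fun p => fawBlock p.1 p.2),
                       st.2 || ws.any (fun p => ((pvGetD p.2 "listings" []).take 5).any pvHq)) := by
  induction ws generalizing st with
  | nil => simp [fawOuterA]
  | cons wpair rest ih =>
    obtain ⟨w, data⟩ := wpair
    simp only [fawOuterA]
    by_cases h : pvGetD data "listings" [] = []
    · simp [h, ih, fawBlock]
    · simp [h, ih, fawBlock, fawInnerA_eq, Bool.or_assoc]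

-- ===== VERDICT (by name: the statement is the Claim_ definition above) =====
theorem format_all_worlds_spec : Claim_equal_format_all_worlds := by
  intro wd _
  show format_all_worlds wd = format_all_worlds_alt wd
  simp only [format_all_worlds, format_all_worlds_alt, fawOuterA_eq]
  by_cases h : wd.any (fun p => ((pvGetD p.2 "listings" []).take 5).any pvHq)
  · simp [h]
  · simp [h]
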